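-- pv_equiv track=rewrite | github.com/zarbopiero963-droid/Pickfair | tools/ai_reasoning_guard.py | compare_api_snapshot
-- ===== SOURCE A (Python) =====
-- from typing import Any, Dict, List, Optional, Tuple
--
-- def compare_api_snapshot(current: Dict[str, Any], baseline: Dict[str, Any]) -> Dict[str, Any]:
--     current_keys = set(current)
--     baseline_keys = set(baseline)
--
--     added_modules = sorted(current_keys - baseline_keys)
--     removed_modules = sorted(baseline_keys - current_keys)
--     changed_modules = []
--
--     for mod in sorted(current_keys & baseline_keys):
--         if current[mod] != baseline[mod]:
--             changed_modules.append(mod)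
--
--     return {
--         "added_modules": added_modules,
--         "removed_modules": removed_modules,
--         "changed_modules": changed_modules,
--     }
-- ===== SOURCE B (Python) =====
-- def compare_api_snapshot(current, baseline):
--     cur = sorted(current)
--     base = sorted(baseline)
--     added, removed, changed = [], [], []
--     i = j = 0
--     while i < len(cur) and j < len(base):
--         if cur[i] < base[j]:
--             added.append(cur[i]); i += 1
--         elif base[j] < cur[i]:
--             removed.append(base[j]); j += 1
--         else:
--             if current[cur[i]] != baseline[base[j]]:
--                 changed.append(cur[i])
--             i += 1; j += 1
--     added.extend(cur[i:])
--     removed.extend(base[j:])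
--     return {
--         "added_modules": added,
--         "removed_modules": removed,
--         "changed_modules": changed,
--     }
-- ===== Notes on version B (the rewrite author's own statement) =====
-- stated objective: alternative
-- what changed: Replaces A's set difference/intersection computations by a two-pointer merge of the two sorted key lists that emits added/removed/changed already in sorted order, with no set operations and no post-sorting.
import Mathlib
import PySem

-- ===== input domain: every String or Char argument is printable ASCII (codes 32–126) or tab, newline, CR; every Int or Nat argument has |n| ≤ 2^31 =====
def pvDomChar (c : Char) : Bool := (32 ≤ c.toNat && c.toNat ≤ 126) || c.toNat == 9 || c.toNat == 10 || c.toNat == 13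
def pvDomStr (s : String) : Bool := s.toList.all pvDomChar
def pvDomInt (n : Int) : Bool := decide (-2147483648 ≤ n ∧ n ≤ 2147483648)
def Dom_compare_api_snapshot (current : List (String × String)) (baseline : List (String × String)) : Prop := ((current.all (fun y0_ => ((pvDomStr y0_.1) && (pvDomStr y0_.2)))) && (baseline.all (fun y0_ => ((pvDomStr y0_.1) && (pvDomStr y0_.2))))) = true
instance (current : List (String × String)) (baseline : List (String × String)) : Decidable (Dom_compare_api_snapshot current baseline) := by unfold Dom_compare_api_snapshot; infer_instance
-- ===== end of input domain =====

-- B replaces A's set difference/intersection computations by a two-pointer merge of the two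
-- sorted key lists that emits added/removed/changed directly in sorted order (objective:
-- alternative; same asymptotic cost).

-- ===== PORT A =====
def compare_api_snapshot (current : List (String × String)) (baseline : List (String × String)) : List (String × List String) :=
  let current_keys := PySem.Set.ofList (current.map (·.1))
  let baseline_keys := PySem.Set.ofList (baseline.map (·.1))
  let added_modules := PySem.List.sorted (PySem.Set.diff current_keys baseline_keys) (fun x => x) false
  let removed_modules := PySem.List.sorted (PySem.Set.diff baseline_keys current_keys) (fun x => x) false
  let changed_modules := (PySem.List.sorted (PySem.Set.inter current_keys baseline_keys) (fun x => x) false).foldl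
    (fun acc mod =>
      -- current[mod] / baseline[mod]: mod is in both key sets here, so both lookups succeed;
      -- != on the values is inequality of the two (always-some) lookups
      if (PySem.Dict.mk current).get? mod ≠ (PySem.Dict.mk baseline).get? mod then acc ++ [mod] else acc) []
  [("added_modules", added_modules), ("removed_modules", removed_modules), ("changed_modules", changed_modules)]

-- ===== PORT B =====
-- the while loop of Source B: two pointers over the sorted key lists, producing
-- (added, removed, changed); the trailing extend(cur[i:]) / extend(base[j:]) are the
-- base cases where one list is exhausted
def pvMergeB (cd bd : PySem.Dict String String) : List String → List String → List String × List String × List String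
  | [], bs => ([], bs, [])
  | a :: as_, [] => (a :: as_, [], [])
  | a :: as_, b :: bs =>
    if a < b then
      let r := pvMergeB cd bd as_ (b :: bs); (a :: r.1, r.2.1, r.2.2)
    else if b < a then
      let r := pvMergeB cd bd (a :: as_) bs; (r.1, b :: r.2.1, r.2.2)
    else
      let r := pvMergeB cd bd as_ bs
      -- current[cur[i]] != baseline[base[j]]: both keys present, lookup inequality
      if cd.get? a ≠ bd.get? b then (r.1, r.2.1, a :: r.2.2) else r
termination_by as_ bs => as_.length + bs.length
decreasing_by all_goals simp <;> omega

def compare_api_snapshot_alt (current : List (String × String)) (baseline : List (String × String)) : List (String × List String) :=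
  -- sorted(current) on a dict = sorted list of its (distinct) keys
  let cur := PySem.List.sorted (PySem.Set.ofList (current.map (·.1))) (fun x => x) false
  let base := PySem.List.sorted (PySem.Set.ofList (baseline.map (·.1))) (fun x => x) false
  let r := pvMergeB (PySem.Dict.mk current) (PySem.Dict.mk baseline) cur base
  [("added_modules", r.1), ("removed_modules", r.2.1), ("changed_modules", r.2.2)]

-- ===== PRECONDITION & SPEC =====
def Spec_compare_api_snapshot (current : List (String × String)) (baseline : List (String × String)) (out : List (String × List String)) : Prop := out = compare_api_snapshot_alt current baseline
instance (current : List (String × String)) (baseline : List (String × String)) (out : List (String × List String)) : Decidable (Spec_compare_api_snapshot current baseline out) := by unfold Spec_compare_api_snapshot; infer_instance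

-- ===== CLAIM (what is proved, stated in full; the proofs are below) =====
def Claim_equal_compare_api_snapshot : Prop := ∀ (current : List (String × String)) (baseline : List (String × String)), Dom_compare_api_snapshot current baseline → Spec_compare_api_snapshot current baseline (compare_api_snapshot current baseline)

-- ===== LEMMAS AND PROOFS =====

-- the merge of two strictly increasing key lists is the three membership filters
theorem pvMergeB_eq_filters (cd bd : PySem.Dict String String) :
    ∀ (cur base : List String), cur.Pairwise (· < ·) → base.Pairwise (· < ·) →
    pvMergeB cd bd cur base
      = (cur.filter (fun a => decide (a ∉ base)),
         base.filter (fun b => decide (b ∉ cur)),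
         cur.filter (fun a => decide (a ∈ base) && decide (cd.get? a ≠ bd.get? a))) := by
  intro cur
  induction cur with
  | nil =>
    intro base _ _
    simp [pvMergeB]
  | cons a as_ iha =>
    intro base hcur hbase
    induction base with
    | nil => simp [pvMergeB]
    | cons b bs ihb =>
      rw [pvMergeB]
      have has : ∀ x ∈ as_, a < x := fun x hx => (List.pairwise_cons.1 hcur).1 x hx
      have hbs : ∀ x ∈ bs, b < x := fun x hx => (List.pairwise_cons.1 hbase).1 x hx
      by_cases hab : a < b
      · rw [if_pos hab, iha (b :: bs) (List.pairwise_cons.1 hcur).2 hbase]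
        have hanb : a ∉ b :: bs := by
          intro h
          rcases List.mem_cons.1 h with h | h
          · exact absurd hab (by simp [h])
          · exact absurd (lt_trans hab (hbs a h)) (lt_irrefl a)
        have hrm : List.filter (fun x => decide (x ∉ a :: as_)) (b :: bs)
                 = List.filter (fun x => decide (x ∉ as_)) (b :: bs) := by
          apply List.filter_congr
          intro x hx
          have hax : a < x := by
            rcases List.mem_cons.1 hx with h | h
            · exact h ▸ hab
            · exact lt_trans hab (hbs x h)
          simp [List.mem_cons, (ne_of_gt hax)]
        rw [hrm]
        have h1 : ¬ a = b := ne_of_lt hab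
        have h2 : a ∉ bs := fun h => absurd (lt_trans hab (hbs a h)) (lt_irrefl a)
        simp [List.filter_cons, h1, h2]
      · by_cases hba : b < a
        · rw [if_neg hab, if_pos hba, ihb (List.pairwise_cons.1 hbase).2]
          have hbna : b ∉ a :: as_ := by
            intro h
            rcases List.mem_cons.1 h with h | h
            · exact absurd hba (by simp [h])
            · exact absurd (lt_trans hba (has b h)) (lt_irrefl b)
          have hadd : List.filter (fun x => decide (x ∉ b :: bs)) (a :: as_)
                    = List.filter (fun x => decide (x ∉ bs)) (a :: as_) := by
            apply List.filter_congr
            intro x hx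
            have hbx : b < x := by
              rcases List.mem_cons.1 hx with h | h
              · exact h ▸ hba
              · exact lt_trans hba (has x h)
            simp [List.mem_cons, (ne_of_gt hbx)]
          have hch : List.filter (fun x => decide (x ∈ b :: bs) && decide (cd.get? x ≠ bd.get? x)) (a :: as_)
                   = List.filter (fun x => decide (x ∈ bs) && decide (cd.get? x ≠ bd.get? x)) (a :: as_) := by
            apply List.filter_congr
            intro x hx
            have hbx : b < x := by
              rcases List.mem_cons.1 hx with h | h
              · exact h ▸ hba
              · exact lt_trans hba (has x h)
            simp [List.mem_cons, (ne_of_gt hbx)]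
          rw [hadd, hch]
          have h1 : ¬ b = a := ne_of_lt hba
          have h2 : b ∉ as_ := fun h => absurd (lt_trans hba (has b h)) (lt_irrefl b)
          simp [List.filter_cons, h1, h2]
        · have heq : a = b := le_antisymm (not_lt.1 hba) (not_lt.1 hab)
          rw [if_neg hab, if_neg hba, iha bs (List.pairwise_cons.1 hcur).2 (List.pairwise_cons.1 hbase).2]
          subst heq
          have hainb : a ∈ a :: bs := List.mem_cons_self
          have hadd : List.filter (fun x => decide (x ∉ a :: bs)) as_
                    = List.filter (fun x => decide (x ∉ bs)) as_ := by
            apply List.filter_congr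
            intro x hx
            simp [List.mem_cons, (ne_of_gt (has x hx))]
          have hrm : List.filter (fun x => decide (x ∉ a :: as_)) bs
                   = List.filter (fun x => decide (x ∉ as_)) bs := by
            apply List.filter_congr
            intro x hx
            simp [List.mem_cons, (ne_of_gt (hbs x hx))]
          have hch : List.filter (fun x => decide (x ∈ a :: bs) && decide (cd.get? x ≠ bd.get? x)) as_
                   = List.filter (fun x => decide (x ∈ bs) && decide (cd.get? x ≠ bd.get? x)) as_ := by
            apply List.filter_congr
            intro x hx
            simp [List.mem_cons, (ne_of_gt (has x hx))]
          by_cases hne : cd.get? a ≠ bd.get? a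
          · simp only [if_pos hne]
            rw [← hadd, ← hrm, ← hch]
            simp [hne]
          · simp only [if_neg hne]
            rw [← hadd, ← hrm, ← hch]
            simp [hne]

-- two strictly increasing lists with the same members are equal
theorem pv_eq_of_same_members (l1 l2 : List String)
    (h1 : l1.Pairwise (· < ·)) (h2 : l2.Pairwise (· < ·)) (h : ∀ z, z ∈ l1 ↔ z ∈ l2) :
    l1 = l2 :=
  List.Perm.eq_of_pairwise'
    (h1.imp le_of_lt) (h2.imp le_of_lt)
    ((List.perm_ext_iff_of_nodup (h1.imp ne_of_lt) (h2.imp ne_of_lt)).2 h)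

-- a list sorted (ascending, identity key) from a Nodup source is strictly increasing
theorem pv_sorted_strict (xs : List String) (hnd : xs.Nodup) :
    (PySem.List.sorted xs (fun x => x) false).Pairwise (· < ·) := by
  have hnd' : (PySem.List.sorted xs (fun x => x) false).Nodup :=
    (PySem.List.sorted_perm _ _ _).nodup_iff.2 hnd
  exact ((PySem.List.sorted_pairwise xs (fun x => x)).and hnd').imp
    (fun h => lt_of_le_of_ne h.1 h.2)

theorem compare_api_snapshot_eq (current baseline : List (String × String)) :
    compare_api_snapshot current baseline = compare_api_snapshot_alt current baseline := by
  unfold compare_api_snapshot compare_api_snapshot_alt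
  have hcnd : (PySem.Set.ofList (current.map (·.1))).Nodup := PySem.Set.nodup_ofList _
  have hbnd : (PySem.Set.ofList (baseline.map (·.1))).Nodup := PySem.Set.nodup_ofList _
  have hcur : (PySem.List.sorted (PySem.Set.ofList (current.map (·.1))) (fun x => x) false).Pairwise (· < ·) :=
    pv_sorted_strict _ hcnd
  have hbase : (PySem.List.sorted (PySem.Set.ofList (baseline.map (·.1))) (fun x => x) false).Pairwise (· < ·) :=
    pv_sorted_strict _ hbnd
  dsimp only
  rw [pvMergeB_eq_filters _ _ _ _ hcur hbase, PySem.List.foldl_append_ite_eq_filter, List.nil_append]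
  refine congrArg₂ _ (congrArg _ ?_) (congrArg₂ _ (congrArg _ ?_) (congrArg₂ _ (congrArg _ ?_) rfl))
  · -- added
    apply pv_eq_of_same_members _ _
      (pv_sorted_strict _ (PySem.Set.nodup_diff _ _ hcnd)) (hcur.filter _)
    intro z
    simp [PySem.List.mem_sorted, PySem.Set.mem_diff, List.mem_filter]
  · -- removed
    apply pv_eq_of_same_members _ _
      (pv_sorted_strict _ (PySem.Set.nodup_diff _ _ hbnd)) (hbase.filter _)
    intro z
    simp [PySem.List.mem_sorted, PySem.Set.mem_diff, List.mem_filter]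
  · -- changed
    apply pv_eq_of_same_members _ _
      ((pv_sorted_strict _ (PySem.Set.nodup_inter _ _ hcnd)).filter _) (hcur.filter _)
    intro z
    simp only [List.mem_filter, PySem.List.mem_sorted, PySem.Set.mem_inter,
      Bool.and_eq_true, decide_eq_true_eq]
    tauto

-- ===== VERDICT (by name: the statement is the Claim_ definition above) =====
theorem compare_api_snapshot_spec : Claim_equal_compare_api_snapshot := by
  intro current baseline _
  unfold Spec_compare_api_snapshot
  exact compare_api_snapshot_eq current baseline
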